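-- pv_equiv track=rewrite | github.com/yvonnekmatos/kkbox-churn-project | select_features.py | eliminate_collinear_features
-- ===== SOURCE A (Python) =====
-- def eliminate_collinear_features(all_feat, collinear_vars):
--     big_ls = []
--     # Taking pairs in feature rank (1,2) (2,3) ...
--     for first, second in zip(all_feat, all_feat[1:]):
--         ls = []
--         ls.append(first)
--         ls.append(second)
--         big_ls.append(ls)
--
--     coll_pairs = []
--     for elem in big_ls:
--         if elem in collinear_vars or elem[::-1] in collinear_vars:
--             coll_pairs.append(elem)
--
--     exclude = [elem[1] for elem in coll_pairs]
--     round_1_keep = [elem for elem in all_feat if elem not in exclude]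
--     return round_1_keep
-- ===== SOURCE B (Python) =====
-- def eliminate_collinear_features(all_feat, collinear_vars):
--     # Index table: feature name -> set of positions at which it occurs.
--     pos = {}
--     for i, f in enumerate(all_feat):
--         s = pos.get(f, set())
--         s.add(i)
--         pos[f] = s
--
--     def precedes(x, y):
--         xs = pos.get(x)
--         ys = pos.get(y)
--         if xs is None or ys is None:
--             return False
--         return any(i + 1 in ys for i in xs)
--
--     # Traverse collinear_vars against the index table; for a pair [x, y],
--     # whichever member immediately follows the other somewhere in all_feat
--     # is the one A excludes (the second element of the adjacent pair).
--     exclude = set()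
--     for p in collinear_vars:
--         if len(p) == 2:
--             x, y = p
--             if precedes(x, y):
--                 exclude.add(y)
--             if precedes(y, x):
--                 exclude.add(x)
--     return [f for f in all_feat if f not in exclude]
-- ===== Notes on version B (the rewrite author's own statement) =====
-- stated objective: faster
-- what changed: Instead of materialising the list of adjacent feature pairs and scanning collinear_vars for each, B builds a position index (name -> set of indices) over all_feat once and iterates over collinear_vars, excluding for each pair the member that immediately follows the other somewhere in all_feat.
import Mathlib
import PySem

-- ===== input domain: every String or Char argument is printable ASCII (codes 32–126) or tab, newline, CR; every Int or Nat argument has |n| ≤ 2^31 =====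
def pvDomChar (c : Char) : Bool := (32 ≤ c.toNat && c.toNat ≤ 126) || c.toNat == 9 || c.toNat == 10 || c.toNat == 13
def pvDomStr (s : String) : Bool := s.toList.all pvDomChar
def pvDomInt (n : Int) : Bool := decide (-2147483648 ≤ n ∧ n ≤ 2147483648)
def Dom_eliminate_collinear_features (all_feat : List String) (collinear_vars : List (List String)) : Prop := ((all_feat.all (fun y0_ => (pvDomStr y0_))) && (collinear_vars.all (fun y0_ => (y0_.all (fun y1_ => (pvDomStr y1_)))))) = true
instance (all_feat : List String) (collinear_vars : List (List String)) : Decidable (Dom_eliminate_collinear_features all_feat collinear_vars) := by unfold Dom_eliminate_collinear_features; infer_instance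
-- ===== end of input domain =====

-- B replaces A's adjacent-pair list and repeated scans of collinear_vars by a position index over
-- all_feat traversed once per collinear pair (faster in a timing run); A and B return the same list.

-- ===== PORT A =====
def eliminate_collinear_features (all_feat : List String) (collinear_vars : List (List String)) : List String :=
  -- for first, second in zip(all_feat, all_feat[1:]): big_ls.append([first, second])
  let big_ls := (all_feat.zip (all_feat.drop 1)).map (fun fs => [fs.1, fs.2])
  -- for elem in big_ls: if elem in collinear_vars or elem[::-1] in collinear_vars
  let coll_pairs := big_ls.filter (fun elem => collinear_vars.contains elem || collinear_vars.contains elem.reverse)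
  -- exclude = [elem[1] for elem in coll_pairs]  (each elem has length 2, so elem[1] is total)
  let exclude := coll_pairs.map (fun elem => elem.getD 1 "")
  all_feat.filter (fun f => !(exclude.contains f))

-- ===== PORT B =====
-- pos = {}; for i, f in enumerate(all_feat): s = pos.get(f, set()); s.add(i); pos[f] = s
def pvPosIndex (all_feat : List String) : PySem.Dict String (PySem.Set Int) :=
  (PySem.List.enumerate all_feat).foldl
    (fun d p => d.insert p.2 (PySem.Set.add (d.getD p.2 PySem.Set.empty) p.1)) PySem.Dict.empty

-- def precedes(x, y): xs = pos.get(x); ys = pos.get(y); if xs is None or ys is None: return False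
--   return any(i + 1 in ys for i in xs)
def pvPrecedes (pos : PySem.Dict String (PySem.Set Int)) (x y : String) : Bool :=
  match pos.get? x, pos.get? y with
  | some xs, some ys => xs.any (fun i => PySem.Set.contains ys (i + 1))
  | _, _ => false

def eliminate_collinear_features_alt (all_feat : List String) (collinear_vars : List (List String)) : List String :=
  let pos := pvPosIndex all_feat
  -- exclude = set(); for p in collinear_vars: if len(p) == 2: x, y = p; …
  let exclude : PySem.Set String :=
    collinear_vars.foldl
      (fun ex p =>
        match p with
        | [x, y] =>
          let ex := if pvPrecedes pos x y then PySem.Set.add ex y else ex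
          if pvPrecedes pos y x then PySem.Set.add ex x else ex
        | _ => ex)
      PySem.Set.empty
  all_feat.filter (fun f => !(exclude.contains f))

-- ===== PRECONDITION & SPEC =====
def Spec_eliminate_collinear_features (all_feat : List String) (collinear_vars : List (List String)) (out : List String) : Prop := out = eliminate_collinear_features_alt all_feat collinear_vars
instance (all_feat : List String) (collinear_vars : List (List String)) (out : List String) : Decidable (Spec_eliminate_collinear_features all_feat collinear_vars out) := by unfold Spec_eliminate_collinear_features; infer_instance

-- ===== CLAIM (what is proved, stated in full; the proofs are below) =====
def Claim_equal_eliminate_collinear_features : Prop := ∀ (all_feat : List String) (collinear_vars : List (List String)), Dom_eliminate_collinear_features all_feat collinear_vars → Spec_eliminate_collinear_features all_feat collinear_vars (eliminate_collinear_features all_feat collinear_vars)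

-- ===== LEMMAS AND PROOFS =====

-- Membership in the index built by B's first loop: i is recorded under f iff (i, f) was enumerated.
theorem pv_mem_posIndex_fold (l : List (Int × String)) :
    ∀ (d : PySem.Dict String (PySem.Set Int)) (f : String) (i : Int),
      (i ∈ (l.foldl (fun d p => d.insert p.2 (PySem.Set.add (d.getD p.2 PySem.Set.empty) p.1)) d).getD f PySem.Set.empty
        ↔ i ∈ d.getD f PySem.Set.empty ∨ (i, f) ∈ l) := by
  induction l with
  | nil => simp
  | cons hd tl ih =>
    intro d f i
    rw [List.foldl_cons, ih]
    by_cases hf : f = hd.2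
    · subst hf
      rw [PySem.Dict.getD_insert_self, PySem.Set.mem_add]
      constructor
      · rintro ((h | rfl) | h)
        · exact Or.inl h
        · exact Or.inr (List.mem_cons_self ..)
        · exact Or.inr (List.mem_cons_of_mem _ h)
      · rintro (h | h)
        · exact Or.inl (Or.inl h)
        · rcases List.mem_cons.mp h with h | h
          · obtain ⟨h1, h2⟩ := Prod.mk.injEq .. ▸ h
            exact Or.inl (Or.inr h1)
          · exact Or.inr h
    · rw [PySem.Dict.getD_insert_of_ne _ _ _ hf]
      constructor
      · rintro (h | h)
        · exact Or.inl h
        · exact Or.inr (List.mem_cons_of_mem _ h)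
      · rintro (h | h)
        · exact Or.inl h
        · rcases List.mem_cons.mp h with h | h
          · obtain ⟨h1, h2⟩ := Prod.mk.injEq .. ▸ h
            exact absurd h2 hf
          · exact Or.inr h

theorem pv_mem_posIndex (all_feat : List String) (f : String) (i : Int) :
    i ∈ (pvPosIndex all_feat).getD f PySem.Set.empty ↔ (i, f) ∈ PySem.List.enumerate all_feat := by
  unfold pvPosIndex
  rw [pv_mem_posIndex_fold]
  simp [PySem.Dict.getD_empty, PySem.Set.empty]

-- pvPrecedes read through getD (covers the missing-key branches: getD gives the empty set there).
theorem pv_precedes_getD (pos : PySem.Dict String (PySem.Set Int)) (x y : String) :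
    pvPrecedes pos x y =
      (pos.getD x PySem.Set.empty).any (fun i => PySem.Set.contains (pos.getD y PySem.Set.empty) (i + 1)) := by
  rcases h1 : pos.get? x with _ | xs <;> rcases h2 : pos.get? y with _ | ys <;>
    simp [pvPrecedes, PySem.Dict.getD, h1, h2, PySem.Set.empty, PySem.Set.contains_eq_listContains]

-- (i, f) ∈ enumerate all_feat ↔ 0 ≤ i and all_feat[i] = f.
theorem pv_mem_enumerate (all_feat : List String) (i : Int) (f : String) :
    (i, f) ∈ PySem.List.enumerate all_feat ↔ ∃ n : Nat, i = (n : Int) ∧ all_feat[n]? = some f := by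
  have h : ∀ (xs : List String) (s i : Int) (f : String),
      ((i, f) ∈ PySem.List.enumerate xs s ↔ ∃ n : Nat, i = s + (n : Int) ∧ xs[n]? = some f) := by
    intro xs
    induction xs with
    | nil => simp [PySem.List.enumerate_nil]
    | cons hd tl ih =>
      intro s i f
      rw [PySem.List.enumerate_cons, List.mem_cons, ih]
      constructor
      · rintro (h | ⟨n, rfl, hn⟩)
        · rw [Prod.mk.injEq] at h
          exact ⟨0, by omega, by simp [h.2]⟩
        · exact ⟨n + 1, by push_cast; ring, by simpa using hn⟩
      · rintro ⟨n, rfl, hn⟩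
        cases n with
        | zero =>
          simp only [List.getElem?_cons_zero, Option.some.injEq] at hn
          exact Or.inl (by simp [hn])
        | succ m => exact Or.inr ⟨m, by push_cast; ring, by simpa using hn⟩
  simpa using h all_feat 0 i f

-- pvPrecedes over the built index is exact adjacency in all_feat.
theorem pv_precedes_iff (all_feat : List String) (x y : String) :
    pvPrecedes (pvPosIndex all_feat) x y = true ↔
      ∃ n : Nat, all_feat[n]? = some x ∧ all_feat[n + 1]? = some y := by
  rw [pv_precedes_getD]
  simp only [List.any_eq_true, PySem.Set.contains_eq_listContains, List.contains_eq_mem,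
    decide_eq_true_eq, pv_mem_posIndex, pv_mem_enumerate]
  constructor
  · rintro ⟨i, ⟨n, rfl, hx⟩, m, hm, hy⟩
    have : m = n + 1 := by omega
    subst this
    exact ⟨n, hx, hy⟩
  · rintro ⟨n, hx, hy⟩
    exact ⟨(n : Int), ⟨n, rfl, hx⟩, n + 1, by push_cast; ring, hy⟩

-- A's adjacent pairs are exactly the index-adjacent pairs.
theorem pv_mem_zip_adj (all_feat : List String) (a b : String) :
    (a, b) ∈ all_feat.zip (all_feat.drop 1) ↔
      ∃ n : Nat, all_feat[n]? = some a ∧ all_feat[n + 1]? = some b := by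
  rw [List.mem_iff_getElem?]
  refine exists_congr fun n => ?_
  rw [List.getElem?_zip_eq_some, List.getElem?_drop]
  simp [Nat.add_comm]

-- Membership in B's exclude fold.
theorem pv_mem_exclude_fold (pos : PySem.Dict String (PySem.Set Int)) (cv : List (List String)) :
    ∀ (ex : PySem.Set String) (f : String),
      (f ∈ cv.foldl
          (fun ex p =>
            match p with
            | [x, y] =>
              let ex := if pvPrecedes pos x y then PySem.Set.add ex y else ex
              if pvPrecedes pos y x then PySem.Set.add ex x else ex
            | _ => ex)
          ex
        ↔ f ∈ ex ∨ ∃ x y, [x, y] ∈ cv ∧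
            ((pvPrecedes pos x y = true ∧ y = f) ∨ (pvPrecedes pos y x = true ∧ x = f))) := by
  induction cv with
  | nil => simp
  | cons p tl ih =>
    intro ex f
    rcases p with _ | ⟨x, _ | ⟨y, _ | ⟨z, rest⟩⟩⟩
    · rw [List.foldl_cons, ih]; simp
    · rw [List.foldl_cons, ih]; simp
    · rw [List.foldl_cons, ih]
      simp only [List.mem_cons, List.cons.injEq, and_true]
      by_cases h1 : pvPrecedes pos x y <;> by_cases h2 : pvPrecedes pos y x <;>
        simp only [h1, h2, if_true, if_false, Bool.false_eq_true, PySem.Set.mem_add] <;>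
        constructor
      · rintro (((h | rfl) | rfl) | ⟨a, b, hab, hc⟩)
        · exact Or.inl h
        · exact Or.inr ⟨x, f, Or.inl ⟨rfl, rfl⟩, Or.inl ⟨h1, rfl⟩⟩
        · exact Or.inr ⟨f, y, Or.inl ⟨rfl, rfl⟩, Or.inr ⟨h2, rfl⟩⟩
        · exact Or.inr ⟨a, b, Or.inr hab, hc⟩
      · rintro (h | ⟨a, b, hab, hc⟩)
        · exact Or.inl (Or.inl (Or.inl h))
        · rcases hab with ⟨rfl, rfl⟩ | hab
          · rcases hc with ⟨_, rfl⟩ | ⟨_, rfl⟩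
            · exact Or.inl (Or.inl (Or.inr rfl))
            · exact Or.inl (Or.inr rfl)
          · exact Or.inr ⟨a, b, hab, hc⟩
      · rintro ((h | rfl) | ⟨a, b, hab, hc⟩)
        · exact Or.inl h
        · exact Or.inr ⟨x, f, Or.inl ⟨rfl, rfl⟩, Or.inl ⟨h1, rfl⟩⟩
        · exact Or.inr ⟨a, b, Or.inr hab, hc⟩
      · rintro (h | ⟨a, b, hab, hc⟩)
        · exact Or.inl (Or.inl h)
        · rcases hab with ⟨rfl, rfl⟩ | hab
          · rcases hc with ⟨_, rfl⟩ | ⟨hp, rfl⟩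
            · exact Or.inl (Or.inr rfl)
            · exact absurd hp (by simp [h2])
          · exact Or.inr ⟨a, b, hab, hc⟩
      · rintro ((h | rfl) | ⟨a, b, hab, hc⟩)
        · exact Or.inl h
        · exact Or.inr ⟨f, y, Or.inl ⟨rfl, rfl⟩, Or.inr ⟨h2, rfl⟩⟩
        · exact Or.inr ⟨a, b, Or.inr hab, hc⟩
      · rintro (h | ⟨a, b, hab, hc⟩)
        · exact Or.inl (Or.inl h)
        · rcases hab with ⟨rfl, rfl⟩ | hab
          · rcases hc with ⟨hp, rfl⟩ | ⟨_, rfl⟩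
            · exact absurd hp (by simp [h1])
            · exact Or.inl (Or.inr rfl)
          · exact Or.inr ⟨a, b, hab, hc⟩
      · rintro (h | ⟨a, b, hab, hc⟩)
        · exact Or.inl h
        · exact Or.inr ⟨a, b, Or.inr hab, hc⟩
      · rintro (h | ⟨a, b, hab, hc⟩)
        · exact Or.inl h
        · rcases hab with ⟨rfl, rfl⟩ | hab
          · rcases hc with ⟨hp, rfl⟩ | ⟨hp, rfl⟩
            · exact absurd hp (by simp [h1])
            · exact absurd hp (by simp [h2])
          · exact Or.inr ⟨a, b, hab, hc⟩
    · rw [List.foldl_cons, ih]; simp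

-- ===== VERDICT (by name: the statement is the Claim_ definition above) =====
theorem eliminate_collinear_features_spec : Claim_equal_eliminate_collinear_features := by
  intro all_feat cv _
  unfold Spec_eliminate_collinear_features eliminate_collinear_features eliminate_collinear_features_alt
  apply List.filter_congr
  intro f _
  congr 1
  rw [Bool.eq_iff_iff]
  constructor <;> intro hmem <;>
    simp only [PySem.Set.contains_eq_listContains, List.contains_eq_mem, decide_eq_true_eq] at hmem ⊢
  · -- f ∈ A's exclude list → f ∈ B's exclude set
    simp only [List.mem_map, List.mem_filter] at hmem
    obtain ⟨elem, ⟨⟨⟨a, b⟩, hzip, rfl⟩, hc⟩, hv⟩ := hmem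
    simp only [List.getD, List.getElem?_cons_succ, List.getElem?_cons_zero, Option.getD_some] at hv
    subst hv
    rw [pv_mem_exclude_fold]
    obtain ⟨n, ha, hb⟩ := (pv_mem_zip_adj all_feat a b).mp hzip
    simp only [Bool.or_eq_true, decide_eq_true_eq, List.reverse_cons,
      List.reverse_nil, List.nil_append, List.cons_append] at hc
    rcases hc with hc | hc
    · exact Or.inr ⟨a, b, hc, Or.inl ⟨(pv_precedes_iff all_feat a b).mpr ⟨n, ha, hb⟩, rfl⟩⟩
    · exact Or.inr ⟨b, a, hc, Or.inr ⟨(pv_precedes_iff all_feat a b).mpr ⟨n, ha, hb⟩, rfl⟩⟩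
  · -- f ∈ B's exclude set → f ∈ A's exclude list
    rw [pv_mem_exclude_fold] at hmem
    rcases hmem with h0 | ⟨x, y, hcv, hc⟩
    · exact absurd h0 (by simp [PySem.Set.empty])
    · simp only [List.mem_map, List.mem_filter]
      rcases hc with ⟨hp, rfl⟩ | ⟨hp, rfl⟩
      · obtain ⟨n, hx, hy⟩ := (pv_precedes_iff all_feat x y).mp hp
        refine ⟨[x, y], ⟨⟨(x, y), (pv_mem_zip_adj all_feat x y).mpr ⟨n, hx, hy⟩, rfl⟩, ?_⟩, by simp [List.getD]⟩
        simp [hcv]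
      · obtain ⟨n, hy, hx⟩ := (pv_precedes_iff all_feat y x).mp hp
        refine ⟨[y, x], ⟨⟨(y, x), (pv_mem_zip_adj all_feat y x).mpr ⟨n, hy, hx⟩, rfl⟩, ?_⟩, by simp [List.getD]⟩
        simp [hcv]
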